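-- pv_equiv track=rewrite | github.com/predict-ably/predictably-core | predictably_core/utils/_utils.py | update_dict_at
-- ===== SOURCE A (Python) =====
-- from typing import Any, Mapping, Optional, Union
--
-- def update_dict_at(
--     input_dict: dict[Any, Any],
--     new_dict: dict[Any, Any],
--     at: Optional[int] = None,
--     keep_new: bool = True,
-- ) -> dict[Any, Any]:
--     """Update a dictionary with a new dictionary at a given 'position'.
--
--     Provides additional functionality above usual dictionary `update` method
--     by allowing the "update" to occur at a particular position in the dictionary
--     rather than the end.
--
--     Unlike the usual dictionary update, the function returns the updated value.
--
--     Parameters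
--     ----------
--     input_dict : dict[Any, Any]
--         The dictionary to "update".
--     new_dict : dict[Any, Any]
--         The dictionary to use to update `input_dict`.
--     at : int | None, default=None
--         The "position" the update should occur at.
--
--         - If None, then this updates the values starting at the end of `input_dict`.
--         - If a positive integer is provided then the update is performed at the
--           index position determined from the start of `input_dict`. Positive `at`
--           values greater than the length of `input_dict` cause the update to occur
--           at the end of the `input_dict`.
--         - If a negative integer is provided then the update is performed at the
--           index position determined from the end of `input_dict`. Negative `at`
--           values whose magnitude is greater than the length of `input_dict`
--           cause the update to occur at the beginning of the `input_dict`.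
--
--     keep_new : bool, default=True
--         Whether to keep the values from `new_dict` when updating keys that exist
--         after the `at` position.
--
--     Returns
--     -------
--     dict[Any, Any]
--         The updated dictionary.
--
--     Examples
--     --------
--     >>> from predictably_core.utils import update_dict_at
--     >>> starting = {"a": 1, "b": 2, "c": 3, "d": 4}
--     >>> new = {"e": 5, "f": 6}
--     >>> new2 = {"g": 7, "a": -1}
--
--     When the `at` parameter is not specified the update comes at the end like usual.
--
--     >>> update_dict_at(starting, new)
--     {'a': 1, 'b': 2, 'c': 3, 'd': 4, 'e': 5, 'f': 6}
--     >>> update_dict_at(starting, new2)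
--     {'a': -1, 'b': 2, 'c': 3, 'd': 4, 'g': 7}
--
--     When `at` is specified the update starts at that index.
--
--     >>> update_dict_at(starting, new, at=2)
--     {'a': 1, 'b': 2, 'e': 5, 'f': 6, 'c': 3, 'd': 4}
--
--     By default the new values of keys that come after the `at` position are kept.
--
--     >>> new3 = {"e": 5, "f": 6, "d":-1}
--     >>> update_dict_at(starting, new3, at=2)
--     {'a': 1, 'b': 2, 'e': 5, 'f': 6, 'd': -1, 'c': 3}
--
--     Setting `keep_new` to False changes this behavior.
--
--     >>> update_dict_at(starting, new3, at=2, keep_new=False)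
--     {'a': 1, 'b': 2, 'e': 5, 'f': 6, 'd': 4, 'c': 3}
--     """
--     if not (isinstance(input_dict, dict) and isinstance(new_dict, dict)):
--         raise ValueError(
--             "`input_dict` and `new_dict` must both be dictionaries."
--             f"\n But `input_dict` has type {type(input_dict)} and `new_dict` "
--             f"type {type(new_dict)}."
--         )
--     keys = tuple(input_dict)
--     if at is None:
--         at = len(input_dict)
--     if not isinstance(at, int):
--         raise ValueError(f"`at` must be an int or None, but found {at}.")
--     # Step 1: Get keys up until "at" position
--     output_ = {k: v for k, v in input_dict.items() if k in keys[:at]}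
--     # Step 2: Add new keys
--     output_.update(new_dict)
--     # Step 3: Add remaining values from original dict
--     remaining = {
--         k: v
--         for k, v in input_dict.items()
--         if k in keys[at:] and not (keep_new and k in new_dict)
--     }
--     output_.update(remaining)
--     return output_
-- ===== SOURCE B (Python) =====
-- def update_dict_at(input_dict, new_dict, at=None, keep_new=True):
--     """Single indexed pass: compute the clamped cut once, then stream the items."""
--     n = len(input_dict)
--     if at is None:
--         at = n
--     cut = len(list(input_dict)[:at])
--     out = {}
--     for i, (k, v) in enumerate(input_dict.items()):
--         if i == cut:
--             out.update(new_dict)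
--         if i < cut:
--             out[k] = v
--         elif not (keep_new and k in new_dict):
--             out[k] = v
--     if cut >= n:
--         out.update(new_dict)
--     return out
-- ===== Notes on version B (the rewrite author's own statement) =====
-- stated objective: faster
-- what changed: replaces A's three dict-comprehension passes, each testing every key against a freshly re-built key-slice, by computing the clamped cut index once and streaming the items in a single enumerate pass that emits new_dict when the index reaches the cut
import Mathlib
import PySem

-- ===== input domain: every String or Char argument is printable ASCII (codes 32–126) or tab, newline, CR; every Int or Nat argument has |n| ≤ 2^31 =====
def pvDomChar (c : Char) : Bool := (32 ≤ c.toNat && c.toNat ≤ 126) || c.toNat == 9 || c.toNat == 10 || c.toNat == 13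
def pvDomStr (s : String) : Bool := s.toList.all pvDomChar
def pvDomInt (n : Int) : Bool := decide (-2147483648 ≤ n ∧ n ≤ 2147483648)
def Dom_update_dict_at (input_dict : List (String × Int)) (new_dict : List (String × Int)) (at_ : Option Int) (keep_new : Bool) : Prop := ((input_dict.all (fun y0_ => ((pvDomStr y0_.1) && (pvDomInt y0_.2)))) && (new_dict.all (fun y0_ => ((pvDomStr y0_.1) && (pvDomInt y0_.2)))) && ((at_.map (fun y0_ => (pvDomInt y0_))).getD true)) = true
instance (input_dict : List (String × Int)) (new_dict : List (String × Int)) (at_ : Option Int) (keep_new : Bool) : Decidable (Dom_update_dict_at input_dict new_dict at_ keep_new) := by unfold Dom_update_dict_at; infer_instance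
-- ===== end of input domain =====

-- B computes the clamped cut index once and streams the items in one indexed pass,
-- instead of A's three comprehension/update passes that each test keys against a key slice; faster (in a timing run).

-- ===== PORT A =====
-- A: output_ = {k:v for k,v in d.items() if k in keys[:at]}; output_.update(new); then the remaining suffix items.
def update_dict_at (input_dict : List (String × Int)) (new_dict : List (String × Int)) (at_ : Option Int) (keep_new : Bool) : List (String × Int) :=
  let d := PySem.Dict.ofList input_dict
  let n := PySem.Dict.ofList new_dict
  let keys := d.keys
  let a : Int := at_.getD (d.size : Int)
  let output1 := d.items.foldl
    (fun o p => if (PySem.List.slice keys none (some a)).contains p.1 then o.insert p.1 p.2 else o)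
    PySem.Dict.empty
  let output2 := output1.update n.items
  let remaining := d.items.foldl
    (fun o p => if (PySem.List.slice keys (some a) none).contains p.1 && !(keep_new && n.contains p.1) then o.insert p.1 p.2 else o)
    PySem.Dict.empty
  (output2.update remaining.items).items

-- ===== PORT B =====
-- B's loop body: 'for i,(k,v) in enumerate(items): if i==cut: out.update(new); if i<cut: out[k]=v elif not (keep_new and k in new): out[k]=v'
def pvAltLoop (n : PySem.Dict String Int) (keep_new : Bool) (cut : Int) :
    Int → PySem.Dict String Int → List (String × Int) → PySem.Dict String Int
  | _, out, [] => out
  | i, out, (k, v) :: rest =>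
    let out1 := if i = cut then out.update n.items else out
    let out2 :=
      if i < cut then out1.insert k v
      else if keep_new && n.contains k then out1 else out1.insert k v
    pvAltLoop n keep_new cut (i + 1) out2 rest

def update_dict_at_alt (input_dict : List (String × Int)) (new_dict : List (String × Int)) (at_ : Option Int) (keep_new : Bool) : List (String × Int) :=
  let d := PySem.Dict.ofList input_dict
  let n := PySem.Dict.ofList new_dict
  let len : Int := (d.size : Int)
  let a : Int := at_.getD len
  let cut : Int := ((PySem.List.slice d.keys none (some a)).length : Int)
  let out := pvAltLoop n keep_new cut 0 PySem.Dict.empty d.items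
  let out := if cut ≥ len then out.update n.items else out
  out.items

-- ===== PRECONDITION & SPEC =====
def Spec_update_dict_at (input_dict : List (String × Int)) (new_dict : List (String × Int)) (at_ : Option Int) (keep_new : Bool) (out : List (String × Int)) : Prop := out = update_dict_at_alt input_dict new_dict at_ keep_new
instance (input_dict : List (String × Int)) (new_dict : List (String × Int)) (at_ : Option Int) (keep_new : Bool) (out : List (String × Int)) : Decidable (Spec_update_dict_at input_dict new_dict at_ keep_new out) := by unfold Spec_update_dict_at; infer_instance

-- ===== CLAIM (what is proved, stated in full; the proofs are below) =====
def Claim_equal_update_dict_at : Prop := ∀ (input_dict : List (String × Int)) (new_dict : List (String × Int)) (at_ : Option Int) (keep_new : Bool), Dom_update_dict_at input_dict new_dict at_ keep_new → Spec_update_dict_at input_dict new_dict at_ keep_new (update_dict_at input_dict new_dict at_ keep_new)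

-- ===== LEMMAS AND PROOFS =====

-- slice with no start is a take of the clamped stop index
theorem pv_slice_to (xs : List String) (a : Int) :
    PySem.List.slice xs none (some a) = xs.take (PySem.List.clampIdx xs.length a) := by
  simp [PySem.List.slice]

-- slice with no stop is a drop of the clamped start index
theorem pv_slice_from (xs : List String) (a : Int) :
    PySem.List.slice xs (some a) none = xs.drop (PySem.List.clampIdx xs.length a) := by
  simp [PySem.List.slice]

theorem pv_clamp_le (n : Nat) (a : Int) : PySem.List.clampIdx n a ≤ n := by
  unfold PySem.List.clampIdx
  split_ifs <;> omega

-- a guarded insert-fold over fresh distinct keys appends the filtered items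
theorem pv_foldl_insert_if_items (P : String × Int → Bool) :
    ∀ (l : List (String × Int)) (o : PySem.Dict String Int),
      ((o.items.map Prod.fst) ++ l.map Prod.fst).Nodup →
      (l.foldl (fun o p => if P p then o.insert p.1 p.2 else o) o).items
        = o.items ++ l.filter P := by
  intro l
  induction l with
  | nil => intro o _; simp
  | cons p l ih =>
    intro o h
    have hnc : o.contains p.1 = false := by
      rw [PySem.Dict.contains_eq_decide_mem_keys]
      have : p.1 ∉ o.items.map Prod.fst := by
        intro hm
        exact (List.nodup_append.mp h).2.2 p.1 hm p.1 (by simp) rfl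
      simpa [PySem.Dict.keys] using this
    by_cases hP : P p = true
    · simp only [List.foldl_cons, hP, if_pos]
      rw [ih (o.insert p.1 p.2) ?_]
      · rw [PySem.Dict.items_insert_of_not_contains o p.2 hnc]
        simp [hP]
      · rw [PySem.Dict.items_insert_of_not_contains o p.2 hnc]
        simpa using h
    · simp only [List.foldl_cons, hP]
      rw [if_neg (by simp), ih o ?_]
      · simp [hP]
      · refine List.Nodup.sublist ?_ h
        refine List.Sublist.append (List.Sublist.refl _) ?_
        simp

-- keys of the take-slice select exactly the first c items
theorem pv_filter_take (l : List (String × Int)) (c : Nat)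
    (hnd : (l.map Prod.fst).Nodup) :
    l.filter (fun p => ((l.map Prod.fst).take c).contains p.1) = l.take c := by
  have hdisj : List.Disjoint ((l.map Prod.fst).take c) ((l.map Prod.fst).drop c) := by
    have : ((l.map Prod.fst).take c ++ (l.map Prod.fst).drop c).Nodup := by
      simpa using hnd
    exact List.disjoint_of_nodup_append this
  have hsplit : l.filter (fun p => ((l.map Prod.fst).take c).contains p.1)
      = (l.take c).filter (fun p => ((l.map Prod.fst).take c).contains p.1)
        ++ (l.drop c).filter (fun p => ((l.map Prod.fst).take c).contains p.1) := by
    rw [← List.filter_append, List.take_append_drop]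
  rw [hsplit]
  have h1 : (l.take c).filter (fun p => ((l.map Prod.fst).take c).contains p.1) = l.take c := by
    apply List.filter_eq_self.mpr
    intro p hp
    simp only [List.contains_eq_mem, decide_eq_true_iff]
    rw [← List.map_take]
    exact List.mem_map_of_mem hp
  have h2 : (l.drop c).filter (fun p => ((l.map Prod.fst).take c).contains p.1) = [] := by
    apply List.filter_eq_nil_iff.mpr
    intro p hp
    simp only [List.contains_eq_mem, decide_eq_true_iff]
    intro hmem
    exact hdisj hmem (by rw [← List.map_drop]; exact List.mem_map_of_mem hp)
  rw [h1, h2, List.append_nil]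

-- keys of the drop-slice select exactly the suffix items (with an extra condition)
theorem pv_filter_drop (l : List (String × Int)) (c : Nat) (Q : String × Int → Bool)
    (hnd : (l.map Prod.fst).Nodup) :
    l.filter (fun p => ((l.map Prod.fst).drop c).contains p.1 && Q p)
      = (l.drop c).filter Q := by
  have hdisj : List.Disjoint ((l.map Prod.fst).take c) ((l.map Prod.fst).drop c) := by
    have : ((l.map Prod.fst).take c ++ (l.map Prod.fst).drop c).Nodup := by
      simpa using hnd
    exact List.disjoint_of_nodup_append this
  have hsplit : l.filter (fun p => ((l.map Prod.fst).drop c).contains p.1 && Q p)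
      = (l.take c).filter (fun p => ((l.map Prod.fst).drop c).contains p.1 && Q p)
        ++ (l.drop c).filter (fun p => ((l.map Prod.fst).drop c).contains p.1 && Q p) := by
    rw [← List.filter_append, List.take_append_drop]
  rw [hsplit]
  have h1 : (l.take c).filter (fun p => ((l.map Prod.fst).drop c).contains p.1 && Q p) = [] := by
    apply List.filter_eq_nil_iff.mpr
    intro p hp
    simp only [List.contains_eq_mem, Bool.and_eq_true, decide_eq_true_iff, not_and]
    intro hmem _
    exact hdisj (by rw [← List.map_take]; exact List.mem_map_of_mem hp) hmem
  have h2 : (l.drop c).filter (fun p => ((l.map Prod.fst).drop c).contains p.1 && Q p)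
      = (l.drop c).filter Q := by
    apply List.filter_congr
    intro p hp
    have hm : p.1 ∈ (l.map Prod.fst).drop c := by
      rw [← List.map_drop]; exact List.mem_map_of_mem hp
    simp [hm]
  rw [h1, h2, List.nil_append]

-- B's loop while the index stays below the cut: plain inserts
theorem pv_altLoop_lt (n : PySem.Dict String Int) (kn : Bool) (cut : Int) :
    ∀ (l₁ l₂ : List (String × Int)) (i : Int) (o : PySem.Dict String Int),
      i + l₁.length ≤ cut →
      pvAltLoop n kn cut i o (l₁ ++ l₂)
        = pvAltLoop n kn cut (i + l₁.length) (l₁.foldl (fun o p => o.insert p.1 p.2) o) l₂ := by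
  intro l₁
  induction l₁ with
  | nil => intro l₂ i o _; simp
  | cons p l₁ ih =>
    intro l₂ i o h
    obtain ⟨k, v⟩ := p
    have hlt : i < cut := by simp at h; omega
    simp only [List.cons_append, pvAltLoop, if_neg (by omega : ¬ i = cut), if_pos hlt]
    rw [ih l₂ (i + 1) (o.insert k v) (by simp at h ⊢; omega)]
    simp only [List.foldl_cons, List.length_cons]
    congr 1
    omega

-- B's loop once the index is strictly past the cut: conditional inserts, no update
theorem pv_altLoop_gt (n : PySem.Dict String Int) (kn : Bool) (cut : Int) :
    ∀ (l : List (String × Int)) (i : Int) (o : PySem.Dict String Int),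
      cut < i →
      pvAltLoop n kn cut i o l
        = l.foldl (fun o p => if kn && n.contains p.1 then o else o.insert p.1 p.2) o := by
  intro l
  induction l with
  | nil => intro i o _; simp [pvAltLoop]
  | cons p l ih =>
    intro i o h
    obtain ⟨k, v⟩ := p
    simp only [pvAltLoop, if_neg (by omega : ¬ i = cut), if_neg (by omega : ¬ i < cut),
      List.foldl_cons]
    by_cases hc : (kn && n.contains k) = true
    · rw [if_pos hc]
      exact ih (i + 1) o (by omega)
    · rw [if_neg hc]
      exact ih (i + 1) (o.insert k v) (by omega)

-- B's loop at the cut on a nonempty suffix: one update, then conditional inserts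
theorem pv_altLoop_at_cut (n : PySem.Dict String Int) (kn : Bool) (cut : Int)
    (l : List (String × Int)) (o : PySem.Dict String Int) (hl : l ≠ []) :
    pvAltLoop n kn cut cut o l
      = l.foldl (fun o p => if kn && n.contains p.1 then o else o.insert p.1 p.2)
          (o.update n.items) := by
  cases l with
  | nil => exact absurd rfl hl
  | cons p l =>
    obtain ⟨k, v⟩ := p
    simp only [pvAltLoop, List.foldl_cons, if_true, lt_self_iff_false,
      if_false]
    by_cases hc : (kn && n.contains k) = true
    · rw [if_pos hc]
      exact pv_altLoop_gt n kn cut l (cut + 1) _ (by omega)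
    · rw [if_neg hc]
      exact pv_altLoop_gt n kn cut l (cut + 1) _ (by omega)

-- the two conditional-insert step functions of A and B are the same function
theorem pv_step_eq (n : PySem.Dict String Int) (kn : Bool) (o : PySem.Dict String Int)
    (p : String × Int) :
    (if !(kn && n.contains p.1) then o.insert p.1 p.2 else o)
      = (if kn && n.contains p.1 then o else o.insert p.1 p.2) := by
  by_cases h : (kn && n.contains p.1) = true <;> simp [h]

-- ===== VERDICT (by name: the statement is the Claim_ definition above) =====
theorem update_dict_at_spec : Claim_equal_update_dict_at := by
  intro input_dict new_dict at_ keep_new _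
  unfold Spec_update_dict_at update_dict_at update_dict_at_alt
  dsimp only
  set d := PySem.Dict.ofList input_dict with hd
  set n := PySem.Dict.ofList new_dict with hn
  set a : Int := at_.getD (d.size : Int) with ha
  set items := d.items with hitems
  have hkeys : d.keys = items.map Prod.fst := rfl
  have hnd : (items.map Prod.fst).Nodup := by
    rw [← hkeys]; exact PySem.Dict.nodup_keys_ofList input_dict
  set c : Nat := PySem.List.clampIdx items.length a with hc
  have hclen : (items.map Prod.fst).length = items.length := by simp
  have hcle : c ≤ items.length := pv_clamp_le items.length a
  -- the slices
  have hs1 : PySem.List.slice d.keys none (some a) = (items.map Prod.fst).take c := by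
    rw [hkeys, pv_slice_to]; congr 1; rw [hclen]
  have hs2 : PySem.List.slice d.keys (some a) none = (items.map Prod.fst).drop c := by
    rw [hkeys, pv_slice_from]; congr 1; rw [hclen]
  have hslen : ((PySem.List.slice d.keys none (some a)).length : Int) = (c : Int) := by
    rw [hs1]; simp; omega
  -- A's first pass builds exactly the prefix
  have hout1 : (items.foldl
      (fun o p => if (PySem.List.slice d.keys none (some a)).contains p.1 then o.insert p.1 p.2 else o)
      PySem.Dict.empty).items = items.take c := by
    rw [pv_foldl_insert_if_items _ items PySem.Dict.empty (by simpa using hnd)]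
    simp only [PySem.Dict.empty, List.nil_append, hs1]
    exact pv_filter_take items c hnd
  -- A's remaining pass builds exactly the filtered suffix
  have hrem : (items.foldl
      (fun o p => if (PySem.List.slice d.keys (some a) none).contains p.1 && !(keep_new && n.contains p.1) then o.insert p.1 p.2 else o)
      PySem.Dict.empty).items
      = (items.drop c).filter (fun p => !(keep_new && n.contains p.1)) := by
    rw [pv_foldl_insert_if_items _ items PySem.Dict.empty (by simpa using hnd)]
    simp only [PySem.Dict.empty, List.nil_append, hs2]
    exact pv_filter_drop items c _ hnd
  -- shared abbreviations
  set stepB := fun (o : PySem.Dict String Int) (p : String × Int) =>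
    if keep_new && n.contains p.1 then o else o.insert p.1 p.2 with hstepB
  set U := ((items.foldl
      (fun o p => if (PySem.List.slice d.keys none (some a)).contains p.1 then o.insert p.1 p.2 else o)
      PySem.Dict.empty).update n.items) with hU
  -- A's value, rewritten via foldl_filter
  have hA : ((((items.foldl
      (fun o p => if (PySem.List.slice d.keys none (some a)).contains p.1 then o.insert p.1 p.2 else o)
      PySem.Dict.empty).update n.items).update ((items.foldl
      (fun o p => if (PySem.List.slice d.keys (some a) none).contains p.1 && !(keep_new && n.contains p.1) then o.insert p.1 p.2 else o)
      PySem.Dict.empty).items))).items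
      = ((items.drop c).foldl stepB U).items := by
    rw [hrem]
    show (((items.drop c).filter _).foldl (fun acc p => acc.insert p.1 p.2) U).items = _
    rw [List.foldl_filter]
    have hf : (fun (x : PySem.Dict String Int) (y : String × Int) =>
        if (fun p => !(keep_new && n.contains p.1)) y = true then x.insert y.1 y.2 else x)
        = stepB := by
      funext o p
      dsimp only
      exact pv_step_eq n keep_new o p
    rw [hf]
  -- B's prefix fold builds the same dict as A's first pass
  have hpre : ((items.take c).foldl (fun o p => o.insert p.1 p.2) PySem.Dict.empty)
      = (items.foldl
      (fun o p => if (PySem.List.slice d.keys none (some a)).contains p.1 then o.insert p.1 p.2 else o)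
      PySem.Dict.empty) := by
    apply PySem.Dict.ext
    rw [hout1]
    have : ((items.take c).foldl
        (fun o p => if (fun _ => true) p then o.insert p.1 p.2 else o) PySem.Dict.empty).items
        = PySem.Dict.empty.items ++ (items.take c).filter (fun _ => true) := by
      apply pv_foldl_insert_if_items
      simp only [PySem.Dict.empty, List.map_nil, List.nil_append]
      exact (List.Sublist.map Prod.fst (List.take_sublist c items)).nodup hnd
    simpa using this
  -- evaluate B
  rw [hslen]
  by_cases hfull : c = items.length
  · -- empty suffix: the trailing update fires
    have hdrop : items.drop c = [] := by rw [hfull]; simp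
    have : pvAltLoop n keep_new (c : Int) 0 PySem.Dict.empty items
        = (items.take c).foldl (fun o p => o.insert p.1 p.2) PySem.Dict.empty := by
      have := pv_altLoop_lt n keep_new (c : Int) items [] 0 PySem.Dict.empty
        (by simp [hfull])
      simpa [hfull, pvAltLoop, List.take_of_length_le (le_of_eq hfull.symm)] using this
    rw [if_pos (by show (c : Int) ≥ (d.size : Int); simp [PySem.Dict.size, ← hitems, hfull])]
    rw [this, hpre, hA, hdrop]
    rfl
  · -- nonempty suffix: the update fires inside the loop at i = cut
    have hlt' : c < items.length := lt_of_le_of_ne hcle hfull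
    have hdropne : items.drop c ≠ [] := by
      intro hnil
      have := List.length_drop (l := items) (i := c)
      rw [hnil] at this
      simp at this
      omega
    have hsplit : items = items.take c ++ items.drop c := (List.take_append_drop c items).symm
    have hloop : pvAltLoop n keep_new (c : Int) 0 PySem.Dict.empty items
        = (items.drop c).foldl stepB
            (((items.take c).foldl (fun o p => o.insert p.1 p.2) PySem.Dict.empty).update n.items) := by
      conv_lhs => rw [hsplit]
      rw [pv_altLoop_lt n keep_new (c : Int) (items.take c) (items.drop c) 0 PySem.Dict.empty
        (by simp)]
      have hlen : ((0 : Int) + (items.take c).length) = (c : Int) := by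
        simp [List.length_take]; omega
      rw [hlen]
      exact pv_altLoop_at_cut n keep_new (c : Int) (items.drop c) _ hdropne
    rw [if_neg (by show ¬ (c : Int) ≥ (d.size : Int); simp [PySem.Dict.size, ← hitems]; omega)]
    rw [hloop, hpre]
    exact hA
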